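-- pv_equiv track=rewrite | github.com/hingarrboy/Naman-Hingar_RUGVED | TASK1/que3.py | hill
-- ===== SOURCE A (Python) =====
-- def hill(num):
--     s=str(num)
--     n=len(s)
--     i=1
--     while i<n and s[i]>s[i-1]:
--         i+=1
--     if i==1 or i==n:
--         return False
--     while i<n and s[i]<s[i-1]:
--            i+=1
--     return i==n
-- ===== SOURCE B (Python) =====
-- def hill(num):
--     s = str(num)
--     # adjacent-relation list: +1 rise, -1 fall, 0 equal (character comparison)
--     d = [(1 if b > a else -1 if b < a else 0) for a, b in zip(s, s[1:])]
--     p = next((k for k, x in enumerate(d) if x != 1), len(d))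
--     return 1 <= p < len(d) and all(x == -1 for x in d[p:])
-- ===== Notes on version B (the rewrite author's own statement) =====
-- stated objective: alternative
-- what changed: B replaces A's two index-based while loops over the string with a precomputed list of adjacent sign relations (rise/fall/equal), then judges the hill shape by the length of the leading rise prefix and an all-falls check on the rest.
import Mathlib
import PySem

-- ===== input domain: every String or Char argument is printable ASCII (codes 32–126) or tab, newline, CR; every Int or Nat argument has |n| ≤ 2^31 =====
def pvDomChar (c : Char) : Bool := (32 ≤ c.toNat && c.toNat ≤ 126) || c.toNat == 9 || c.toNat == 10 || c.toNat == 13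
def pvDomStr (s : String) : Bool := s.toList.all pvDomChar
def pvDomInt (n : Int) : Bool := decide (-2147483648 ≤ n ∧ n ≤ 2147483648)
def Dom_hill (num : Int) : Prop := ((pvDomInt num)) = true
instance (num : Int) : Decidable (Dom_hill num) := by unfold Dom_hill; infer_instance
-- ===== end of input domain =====

-- B replaces A's two index-based while loops with a precomputed list of adjacent
-- sign relations (rise/fall/equal) judged by its leading rise prefix; same O(n) cost (objective: alternative).

-- ===== PORT A =====
-- while i<n and s[i]>s[i-1]: i+=1
def hillLoopUp (cs : List Char) (n i : Nat) : Nat :=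
  if _h : i < n then
    if cs.getD (i-1) ' ' < cs.getD i ' ' then hillLoopUp cs n (i+1) else i
  else i
termination_by n - i

-- while i<n and s[i]<s[i-1]: i+=1
def hillLoopDown (cs : List Char) (n i : Nat) : Nat :=
  if _h : i < n then
    if cs.getD i ' ' < cs.getD (i-1) ' ' then hillLoopDown cs n (i+1) else i
  else i
termination_by n - i

def hill (num : Int) : Bool :=
  let s := (PySem.Int.toStr num).toList
  let n := s.length
  let i := hillLoopUp s n 1
  if i = 1 ∨ i = n then false
  else decide (hillLoopDown s n i = n)

-- ===== PORT B =====
-- 1 if b>a else -1 if b<a else 0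
def hillSign (a b : Char) : Int := if a < b then 1 else if b < a then -1 else 0

def hill_alt (num : Int) : Bool :=
  let s := (PySem.Int.toStr num).toList
  let d := (s.zip s.tail).map (fun ab => hillSign ab.1 ab.2)
  let p := (d.takeWhile (fun x => x == 1)).length
  decide (1 ≤ p ∧ p < d.length) && (d.drop p).all (fun x => x == -1)

-- ===== PRECONDITION & SPEC =====
def Spec_hill (num : Int) (out : Bool) : Prop := out = hill_alt num
instance (num : Int) (out : Bool) : Decidable (Spec_hill num out) := by unfold Spec_hill; infer_instance

-- ===== CLAIM (what is proved, stated in full; the proofs are below) =====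
def Claim_equal_hill : Prop := ∀ (num : Int), Dom_hill num → Spec_hill num (hill num)

-- ===== LEMMAS AND PROOFS =====

def hillAdj (cs : List Char) : List (Char × Char) := cs.zip cs.tail

theorem hillAdj_length (cs : List Char) : (hillAdj cs).length = cs.length - 1 := by
  simp [hillAdj, List.length_zip, List.length_tail]

theorem hillAdj_drop_cons (cs : List Char) (i : Nat) (h1 : 1 ≤ i) (h2 : i < cs.length) :
    (hillAdj cs).drop (i-1) = (cs.getD (i-1) ' ', cs.getD i ' ') :: (hillAdj cs).drop i := by
  have hlen : i - 1 < (hillAdj cs).length := by rw [hillAdj_length]; omega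
  have hi1 : i - 1 + 1 = i := by omega
  rw [List.drop_eq_getElem_cons hlen, hi1]
  congr 1
  have ha : i - 1 < cs.length := by omega
  have hb : i - 1 < cs.tail.length := by simp [List.length_tail]; omega
  simp [hillAdj, List.getElem_zip, List.getElem_tail, ha, hi1, h2]

theorem hillLoopUp_eq (cs : List Char) (i : Nat) (h1 : 1 ≤ i) :
    hillLoopUp cs cs.length i
      = i + (((hillAdj cs).drop (i-1)).takeWhile (fun ab => decide (ab.1 < ab.2))).length := by
  by_cases h : i < cs.length
  · rw [hillAdj_drop_cons cs i h1 h, hillLoopUp]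
    rw [dif_pos h]
    by_cases hc : cs.getD (i-1) ' ' < cs.getD i ' '
    · rw [if_pos hc, hillLoopUp_eq cs (i+1) (by omega)]
      simp only [List.takeWhile_cons, Nat.add_sub_cancel]
      rw [if_pos (by simpa using hc)]
      simp only [List.length_cons]
      omega
    · rw [if_neg hc]
      simp only [List.takeWhile_cons]
      rw [if_neg (by simpa using hc)]
      simp
  · have hnil : (hillAdj cs).drop (i-1) = [] :=
      List.drop_eq_nil_of_le (by rw [hillAdj_length]; omega)
    rw [hnil, hillLoopUp, dif_neg h]
    simp
termination_by cs.length - i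

theorem hillLoopDown_eq (cs : List Char) (i : Nat) (h1 : 1 ≤ i) :
    hillLoopDown cs cs.length i
      = i + (((hillAdj cs).drop (i-1)).takeWhile (fun ab => decide (ab.2 < ab.1))).length := by
  by_cases h : i < cs.length
  · rw [hillAdj_drop_cons cs i h1 h, hillLoopDown]
    rw [dif_pos h]
    by_cases hc : cs.getD i ' ' < cs.getD (i-1) ' '
    · rw [if_pos hc, hillLoopDown_eq cs (i+1) (by omega)]
      simp only [List.takeWhile_cons, Nat.add_sub_cancel]
      rw [if_pos (by simpa using hc)]
      simp only [List.length_cons]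
      omega
    · rw [if_neg hc]
      simp only [List.takeWhile_cons]
      rw [if_neg (by simpa using hc)]
      simp
  · have hnil : (hillAdj cs).drop (i-1) = [] :=
      List.drop_eq_nil_of_le (by rw [hillAdj_length]; omega)
    rw [hnil, hillLoopDown, dif_neg h]
    simp
termination_by cs.length - i

theorem takeWhile_length_eq_iff_all {α : Type} (p : α → Bool) (l : List α) :
    (l.takeWhile p).length = l.length ↔ l.all p := by
  induction l with
  | nil => simp
  | cons a t ih =>
    by_cases h : p a
    · simp [List.takeWhile, h, ih]
    · simp [List.takeWhile, h]

theorem hill_main (cs : List Char) :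
    (let n := cs.length
     let i := hillLoopUp cs n 1
     if i = 1 ∨ i = n then false else decide (hillLoopDown cs n i = n))
    = (let d := (cs.zip cs.tail).map (fun ab => hillSign ab.1 ab.2)
       let p := (d.takeWhile (fun x => x == 1)).length
       decide (1 ≤ p ∧ p < d.length) && (d.drop p).all (fun x => x == -1)) := by
  have hs1 : ∀ ab : Char × Char, (hillSign ab.1 ab.2 == 1) = decide (ab.1 < ab.2) := by
    intro ab; unfold hillSign
    by_cases h : ab.1 < ab.2
    · simp [h]
    · by_cases h2 : ab.2 < ab.1 <;> simp [h, h2]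
  have hs2 : ∀ ab : Char × Char, (hillSign ab.1 ab.2 == -1) = decide (ab.2 < ab.1) := by
    intro ab; unfold hillSign
    by_cases h : ab.1 < ab.2
    · simp [h, lt_asymm h]
    · by_cases h2 : ab.2 < ab.1 <;> simp [h, h2]
  set A := ((hillAdj cs).takeWhile (fun ab => decide (ab.1 < ab.2))).length with hAdef
  have hup := hillLoopUp_eq cs 1 (by omega)
  simp only [Nat.sub_self, List.drop_zero, ← hAdef] at hup
  have hp : (((cs.zip cs.tail).map (fun ab => hillSign ab.1 ab.2)).takeWhile
      (fun x => x == (1:Int))).length = A := by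
    rw [List.takeWhile_map]
    simp only [List.length_map, Function.comp_def, hs1, hAdef, hillAdj]
  have hL : ((cs.zip cs.tail).map (fun ab => hillSign ab.1 ab.2)).length = (hillAdj cs).length := by
    simp [hillAdj]
  have hadjlen : (hillAdj cs).length = cs.length - 1 := hillAdj_length cs
  have hAle : A ≤ (hillAdj cs).length := by
    rw [hAdef]; exact (List.takeWhile_sublist _).length_le
  dsimp only
  rw [hp, hL, hadjlen, hup]
  by_cases h1 : 1 + A = 1 ∨ 1 + A = cs.length
  · rw [if_pos h1]
    have hno : ¬(1 ≤ A ∧ A < cs.length - 1) := by omega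
    simp [hno]
  · rw [if_neg h1]
    have hAcs : 1 ≤ A ∧ A < cs.length - 1 := by
      rcases Nat.eq_zero_or_pos cs.length with h0 | h0
      · exfalso; omega
      · constructor <;> omega
    have hdown := hillLoopDown_eq cs (1 + A) (by omega)
    have hsub : 1 + A - 1 = A := by omega
    rw [hsub] at hdown
    rw [hdown]
    set T := (((hillAdj cs).drop A).takeWhile (fun ab => decide (ab.2 < ab.1))).length with hTdef
    have hdroplen : ((hillAdj cs).drop A).length = cs.length - 1 - A := by
      simp [hadjlen]
    have hTle : T ≤ cs.length - 1 - A := by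
      rw [hTdef, ← hdroplen]; exact (List.takeWhile_sublist _).length_le
    have hfull := takeWhile_length_eq_iff_all (fun ab => decide (ab.2 < ab.1)) ((hillAdj cs).drop A)
    rw [← hTdef, hdroplen] at hfull
    have hall : (((cs.zip cs.tail).map (fun ab => hillSign ab.1 ab.2)).drop A).all
        (fun x => x == (-1:Int)) = ((hillAdj cs).drop A).all (fun ab => decide (ab.2 < ab.1)) := by
      rw [← List.map_drop, List.all_map]
      simp only [Function.comp_def, hs2, hillAdj]
    rw [hall]
    simp only [hAcs, and_self, decide_true, Bool.true_and]
    cases hall2 : ((hillAdj cs).drop A).all (fun ab => decide (ab.2 < ab.1))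
    · have hTne : T ≠ cs.length - 1 - A := by
        intro hcontra; rw [hfull] at hcontra; simp [hcontra] at hall2
      have : ¬(1 + A + T = cs.length) := by omega
      simp [this]
    · have hTeq : T = cs.length - 1 - A := hfull.mpr hall2
      have : 1 + A + T = cs.length := by omega
      simp [this]

-- ===== VERDICT (by name: the statement is the Claim_ definition above) =====
theorem hill_spec : Claim_equal_hill := by
  intro num _
  unfold Spec_hill hill hill_alt
  exact hill_main ((PySem.Int.toStr num).toList)
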